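-- pv_equiv track=rewrite | github.com/pypi-data/pypi-code-41 | firexapp/firexapp-1.0.4-py2.py3-none-any.whl/submit/submit.py | get_log_dir_from_output
-- ===== SOURCE A (Python) =====
-- def get_log_dir_from_output(cmd_output: str)->str:
--     if not cmd_output:
--         return ""
--
--     lines = cmd_output.split("\n")
--     log_dir_key = "Logs: "
--     try:
--         logs_lines = [line.split(log_dir_key)[1] for line in lines if log_dir_key in line]
--         log_dir_line = logs_lines[-1]
--         return log_dir_line.strip()
--     except IndexError:
--         return ""
-- ===== SOURCE B (Python) =====
-- def get_log_dir_from_output(cmd_output: str) -> str: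
--     key = "Logs: "
--     for line in reversed(cmd_output.split("\n")):
--         if key in line:
--             return line.split(key)[1].strip()
--     return ""
-- ===== Notes on version B (the rewrite author's own statement) =====
-- stated objective: alternative
-- what changed: Instead of building the full list of key-suffixes with a comprehension and then taking its last element, B scans the lines back-to-front and returns at the first line containing the log-dir key (early exit, no intermediate list, no try/except).
import Mathlib
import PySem

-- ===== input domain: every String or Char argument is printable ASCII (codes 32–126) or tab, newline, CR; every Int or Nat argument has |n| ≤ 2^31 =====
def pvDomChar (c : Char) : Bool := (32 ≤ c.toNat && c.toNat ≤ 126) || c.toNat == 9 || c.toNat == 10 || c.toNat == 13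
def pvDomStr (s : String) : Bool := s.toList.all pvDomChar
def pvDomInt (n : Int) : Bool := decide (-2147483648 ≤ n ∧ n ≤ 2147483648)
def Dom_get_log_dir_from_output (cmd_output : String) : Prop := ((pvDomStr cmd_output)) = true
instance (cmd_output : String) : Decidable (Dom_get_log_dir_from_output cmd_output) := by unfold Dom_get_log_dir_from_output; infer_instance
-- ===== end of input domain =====

-- B scans the split lines back-to-front and returns at the first line containing "Logs: ",
-- instead of A's building the full list of suffixes and taking its last element (objective: alternative).


-- ===== PORT A =====
-- s.split(sep) with sep ≠ "": PySem.Str.split? returns some there, so getD [] is exact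
def pvSplit (s sep : String) : List String := (PySem.Str.split? s sep).getD []

-- line.split("Logs: ")[1]: exact because the comprehension filter guarantees "Logs: " occurs in line,
-- so the split has at least two parts and Python's [1] cannot raise.
def get_log_dir_from_output (cmd_output : String) : String :=
  if cmd_output = "" then ""
  else
    let lines := pvSplit cmd_output "\n"
    let log_dir_key := "Logs: "
    let logs_lines := (lines.filter (fun line => PySem.Str.isIn log_dir_key line)).map
      (fun line => PySem.List.pyGetD (pvSplit line log_dir_key) 1 "")
    match PySem.List.pyGet? logs_lines (-1) with
    | some log_dir_line => PySem.Str.strip log_dir_line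
    | none => ""

-- ===== PORT B =====
-- the reversed-lines loop of Source B; line.split(key)[1] is exact here for the same reason as in A's port
def pvAltScan : List String → String
  | [] => ""
  | line :: rest =>
    if PySem.Str.isIn "Logs: " line then
      PySem.Str.strip (PySem.List.pyGetD (pvSplit line "Logs: ") 1 "")
    else pvAltScan rest

def get_log_dir_from_output_alt (cmd_output : String) : String :=
  pvAltScan (pvSplit cmd_output "\n").reverse

-- ===== PRECONDITION & SPEC =====
def Spec_get_log_dir_from_output (cmd_output : String) (out : String) : Prop := out = get_log_dir_from_output_alt cmd_output
instance (cmd_output : String) (out : String) : Decidable (Spec_get_log_dir_from_output cmd_output out) := by unfold Spec_get_log_dir_from_output; infer_instance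

-- ===== CLAIM (what is proved, stated in full; the proofs are below) =====
def Claim_equal_get_log_dir_from_output : Prop := ∀ (cmd_output : String), Dom_get_log_dir_from_output cmd_output → Spec_get_log_dir_from_output cmd_output (get_log_dir_from_output cmd_output)

-- ===== LEMMAS AND PROOFS =====

-- the reverse scan returns the result for the first matching line of its argument
theorem pvAltScan_eq_head (ls : List String) :
    pvAltScan ls =
      match (ls.filter (fun line => PySem.Str.isIn "Logs: " line)).head? with
      | some line => PySem.Str.strip (PySem.List.pyGetD (pvSplit line "Logs: ") 1 "")
      | none => "" := by
  induction ls with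
  | nil => rfl
  | cons l rest ih =>
    by_cases h : PySem.Chars.isIn ['L','o','g','s',':',' '] l.toList
    · simp [pvAltScan, h]
    · simp [pvAltScan, h, ih]

-- ===== VERDICT (by name: the statement is the Claim_ definition above) =====
theorem get_log_dir_from_output_spec : Claim_equal_get_log_dir_from_output := by
  intro cmd_output _
  unfold Spec_get_log_dir_from_output get_log_dir_from_output get_log_dir_from_output_alt
  by_cases h : cmd_output = ""
  · subst h; decide
  · simp only [if_neg h, pvAltScan_eq_head, List.filter_reverse, List.head?_reverse]
    rw [PySem.List.pyGet?_neg_one, List.getLast?_map]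
    cases ((pvSplit cmd_output "\n").filter
        (fun line => PySem.Str.isIn "Logs: " line)).getLast? <;> rfl
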